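-- pv_equiv track=rewrite | github.com/mariibrb/garimpeiro | app.py | format_cnpj_visual
-- ===== SOURCE A (Python) =====
-- def format_cnpj_visual(digits: str) -> str:
--     """Máscara CNPJ (00.000.000/0000-00) a partir apenas de dígitos, até 14."""
--     d = "".join(c for c in str(digits) if c.isdigit())[:14]
--     if not d:
--         return ""
--     n = len(d)
--     if n <= 2:
--         return d
--     if n <= 5:
--         return f"{d[:2]}.{d[2:]}"
--     if n <= 8:
--         return f"{d[:2]}.{d[2:5]}.{d[5:]}"
--     if n <= 12:
--         return f"{d[:2]}.{d[2:5]}.{d[5:8]}/{d[8:]}"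
--     return f"{d[:2]}.{d[2:5]}.{d[5:8]}/{d[8:12]}-{d[12:]}"
-- ===== SOURCE B (Python) =====
-- def format_cnpj_visual(digits: str) -> str:
--     d = "".join(c for c in str(digits) if c.isdigit())[:14]
--     out = []
--     for i, c in enumerate(d):
--         if i == 2 or i == 5:
--             out.append('.')
--         elif i == 8:
--             out.append('/')
--         elif i == 12:
--             out.append('-')
--         out.append(c)
--     return "".join(out)
-- ===== Notes on version B (the rewrite author's own statement) =====
-- stated objective: alternative
-- what changed: Replaced the length-bucket branch cascade with re-slicing by a single left-to-right pass over the cleaned digits that appends the separator due before positions 2, 5, 8 and 12 into an accumulator.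
import Mathlib
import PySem

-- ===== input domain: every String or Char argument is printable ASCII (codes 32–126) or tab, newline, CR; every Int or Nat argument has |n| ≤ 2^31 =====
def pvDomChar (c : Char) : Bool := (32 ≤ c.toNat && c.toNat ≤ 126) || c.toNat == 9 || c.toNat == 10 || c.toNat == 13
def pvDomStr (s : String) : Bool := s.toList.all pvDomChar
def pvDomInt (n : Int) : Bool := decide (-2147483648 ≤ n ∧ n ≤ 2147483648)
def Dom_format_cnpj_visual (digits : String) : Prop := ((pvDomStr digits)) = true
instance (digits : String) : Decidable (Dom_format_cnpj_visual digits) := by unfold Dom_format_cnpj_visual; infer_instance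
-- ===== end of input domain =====

-- B replaces A's length-bucket branch-and-slice cascade by a single left-to-right pass that emits each due separator before the digit at positions 2/5/8/12 (objective: alternative decomposition, same cost).


-- ===== PORT A =====
-- A: length-bucket cascade with slices (literal transliteration of Source A)
def pvMaskA (d : List Char) : String :=
  if d = [] then "" else
  let n : Int := d.length
  if n ≤ 2 then String.ofList d
  else if n ≤ 5 then
    String.ofList (PySem.List.slice d none (some 2) ++ ['.'] ++ PySem.List.slice d (some 2) none)
  else if n ≤ 8 then
    String.ofList (PySem.List.slice d none (some 2) ++ ['.'] ++ PySem.List.slice d (some 2) (some 5)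
      ++ ['.'] ++ PySem.List.slice d (some 5) none)
  else if n ≤ 12 then
    String.ofList (PySem.List.slice d none (some 2) ++ ['.'] ++ PySem.List.slice d (some 2) (some 5)
      ++ ['.'] ++ PySem.List.slice d (some 5) (some 8) ++ ['/'] ++ PySem.List.slice d (some 8) none)
  else
    String.ofList (PySem.List.slice d none (some 2) ++ ['.'] ++ PySem.List.slice d (some 2) (some 5)
      ++ ['.'] ++ PySem.List.slice d (some 5) (some 8) ++ ['/'] ++ PySem.List.slice d (some 8) (some 12)
      ++ ['-'] ++ PySem.List.slice d (some 12) none)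

def format_cnpj_visual (digits : String) : String :=
  pvMaskA (PySem.List.slice (digits.toList.filter PySem.Chars.isdigit) none (some 14))

-- ===== PORT B =====
-- B: one left-to-right pass, emitting the separator due before each position (Source B)
def pvStep (out : List Char) (ic : Int × Char) : List Char :=
  let out1 := if ic.1 = 2 ∨ ic.1 = 5 then out ++ ['.']
              else if ic.1 = 8 then out ++ ['/']
              else if ic.1 = 12 then out ++ ['-']
              else out
  out1 ++ [ic.2]

def pvMaskB (d : List Char) : String :=
  String.ofList ((PySem.List.enumerate d).foldl pvStep [])

def format_cnpj_visual_alt (digits : String) : String :=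
  pvMaskB (PySem.List.slice (digits.toList.filter PySem.Chars.isdigit) none (some 14))

-- ===== PRECONDITION & SPEC =====
def Spec_format_cnpj_visual (digits : String) (out : String) : Prop := out = format_cnpj_visual_alt digits
instance (digits : String) (out : String) : Decidable (Spec_format_cnpj_visual digits out) := by unfold Spec_format_cnpj_visual; infer_instance

-- ===== CLAIM (what is proved, stated in full; the proofs are below) =====
def Claim_equal_format_cnpj_visual : Prop := ∀ (digits : String), Dom_format_cnpj_visual digits → Spec_format_cnpj_visual digits (format_cnpj_visual digits)

-- ===== LEMMAS AND PROOFS =====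
theorem fmt_eq (d : List Char) (h : d.length ≤ 14) : pvMaskA d = pvMaskB d := by
  rcases d with _|⟨a0, _|⟨a1, _|⟨a2, _|⟨a3, _|⟨a4, _|⟨a5, _|⟨a6, _|⟨a7, _|⟨a8, _|⟨a9, _|⟨a10, _|⟨a11, _|⟨a12, _|⟨a13, _|⟨a14, _⟩⟩⟩⟩⟩⟩⟩⟩⟩⟩⟩⟩⟩⟩⟩
  all_goals first
    | (simp only [List.length_cons] at h; omega)
    | (simp [pvMaskA, pvMaskB, pvStep, PySem.List.slice, PySem.List.clampIdx, PySem.List.enumerate,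
             ])

-- ===== VERDICT (by name: the statement is the Claim_ definition above) =====
theorem format_cnpj_visual_spec : Claim_equal_format_cnpj_visual := by
  intro digits _
  unfold Spec_format_cnpj_visual format_cnpj_visual format_cnpj_visual_alt
  apply fmt_eq
  simp [PySem.List.slice, PySem.List.clampIdx]
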